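-- pv_equiv track=rewrite | github.com/tomtastisch/ufo-simulation-schulung | tools/setup/domain/profile.py | _normalize_requirements
-- ===== SOURCE A (Python) =====
-- from enum import StrEnum
-- from typing import Any, Final, Mapping, Literal
--
-- class RequirementOperator(StrEnum):
--     """Unterstützte Vergleichsoperatoren für Dependency-Spezifikationen."""
--
--     NOT_EQUAL = "!="
--     EQUAL = "=="
--     GTE = ">="
--     LTE = "<="
--     GT = ">"
--     LT = "<"
--     COMPAT = "~="
--     EXACT = "==="
--
--     @classmethod
--     def detect(cls, text: str) -> tuple[str, str] | None:
--         """Zerlegt eine Requirement-Spezifikation in (name, version_spec).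
--
--         Beispiele:
--         - "importlinter>=2.0" -> ("importlinter", ">=2.0")
--         - ">=3.10"            -> ("", ">=3.10")  (z. B. für requires-python)
--
--         Liefert None, wenn kein Vergleichsoperator aus RequirementOperator gefunden wird.
--         """
--         spec = text.strip()
--         if not spec:
--             return None
--
--         # Längere Operatoren zuerst prüfen (z. B. ">=" vor ">")
--         operators = sorted(
--             cls.__members__.values(),  # type: dict[str, RequirementOperator].values
--             key=lambda o: len(o.value),  # hier ist o klar ein RequirementOperator
--             reverse=True,
--         )
--
--         candidates: list[tuple[int, str]] = [
--             (pos, op_str)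
--             for op in operators
--             if (op_str := op.value)  # op_str: str
--             if (pos := spec.find(op_str)) != -1
--         ]
--
--         if not candidates:
--             return None
--
--         best_pos, best_op = min(candidates, key=lambda t: t[0])
--
--         name = spec[:best_pos].strip()
--         version_spec = spec[best_pos:].strip()
--         return name, version_spec
--
-- def _normalize_requirements(entries: list[str]) -> Mapping[str, str]:
--     """
--     Normalisiert eine Liste von Abhängigkeiten in ein Mapping name -> spec.
--     """
--     result: dict[str, str] = {}
--
--     for raw in entries:
--         entry: str = raw.strip()
--         if not entry:
--             continue
--
--         detection: tuple[str, str] | None = RequirementOperator.detect(entry)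
--         if detection is None:
--             result[entry] = ""
--         else:
--             name, version_spec = detection
--             result[name] = version_spec
--
--     return result
-- ===== SOURCE B (Python) =====
-- _OPS = ("===", "!=", "==", ">=", "<=", "~=", ">", "<")
--
-- def _detect(spec):
--     # single left-to-right scan: earliest index where any operator starts,
--     # longest-first order breaks ties at that index
--     for i in range(len(spec)):
--         for op in _OPS:
--             if spec.startswith(op, i):
--                 return spec[:i].strip(), spec[i:].strip()
--     return None
--
-- def _normalize_requirements(entries):
--     result = {}
--     for raw in entries:
--         entry = raw.strip()
--         if not entry:
--             continue
--         d = _detect(entry)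
--         if d is None:
--             result[entry] = ""
--         else:
--             result[d[0]] = d[1]
--     return result
-- ===== Notes on version B (the rewrite author's own statement) =====
-- stated objective: simpler
-- what changed: detect's per-operator str.find pass plus a candidate list and min-by-position is replaced by a single left-to-right scan that returns at the first index where any operator (tried longest-first) starts.
import Mathlib
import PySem

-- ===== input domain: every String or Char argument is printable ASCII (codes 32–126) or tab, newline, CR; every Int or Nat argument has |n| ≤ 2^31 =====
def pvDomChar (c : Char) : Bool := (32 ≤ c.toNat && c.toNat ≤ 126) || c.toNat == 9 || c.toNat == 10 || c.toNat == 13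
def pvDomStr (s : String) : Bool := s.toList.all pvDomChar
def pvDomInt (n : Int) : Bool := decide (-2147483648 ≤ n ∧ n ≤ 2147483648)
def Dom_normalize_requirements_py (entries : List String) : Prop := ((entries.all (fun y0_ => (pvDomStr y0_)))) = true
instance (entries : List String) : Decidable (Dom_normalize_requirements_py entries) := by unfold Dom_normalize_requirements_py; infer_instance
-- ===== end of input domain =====

-- B replaces detect's per-operator find + min-over-candidates with a single left-to-right
-- scan returning at the first index where any operator starts (longest-first within an index).

-- ===== PORT A =====
-- one comprehension step of `candidates` (walrus `op_str`/`pos` become lets)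
def pvCandStep (spec : String) (acc : List (Int × String)) (op : String) : List (Int × String) :=
  let op_str := op
  if PySem.Str.len op_str ≠ 0 then      -- `if op_str` truthiness
    let pos := PySem.Str.find spec op_str
    if pos ≠ -1 then acc ++ [(pos, op_str)] else acc
  else acc

-- RequirementOperator.detect
def pvDetect (text : String) : Option (String × String) :=
  let spec := PySem.Str.strip text
  if PySem.Str.len spec = 0 then none   -- `if not spec`
  else
    -- sorted(cls.__members__.values(), key=len, reverse=True), member order as declared
    let operators := PySem.List.sorted ["!=", "==", ">=", "<=", ">", "<", "~=", "==="]
        (fun o => PySem.Str.len o) true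
    let candidates := operators.foldl (pvCandStep spec) []
    match candidates with
    | [] => none
    | c :: _ =>
      -- min(candidates, key=lambda t: t[0]); list is nonempty so the default is never used
      let best := PySem.List.minD candidates (fun t => t.1) c
      some (PySem.Str.strip (PySem.Str.slice spec none (some best.1)),
            PySem.Str.strip (PySem.Str.slice spec (some best.1) none))

-- loop body of the `for raw in entries` loop
def pvStepA (result : PySem.Dict String String) (raw : String) : PySem.Dict String String :=
  let entry := PySem.Str.strip raw
  if PySem.Str.len entry = 0 then result    -- `if not entry: continue`
  else
    match pvDetect entry with
    | none => result.insert entry ""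
    | some (name, version_spec) => result.insert name version_spec

def normalize_requirements_py (entries : List String) : List (String × String) :=
  (entries.foldl pvStepA (PySem.Dict.mk [])).items

-- ===== PORT B =====
def pvOps : List String := ["===", "!=", "==", ">=", "<=", "~=", ">", "<"]

-- `for i in range(len(spec)): for op in _OPS: if spec.startswith(op, i): return …`
-- spec.startswith(op, i) with 0 ≤ i ≤ len(spec) is exactly startswith on the suffix from i
def pvScan (s : List Char) (i : Nat) : Option (String × String) :=
  if _h : i < s.length then
    match pvOps.find? (fun op => PySem.Chars.startswith (s.drop i) op.toList) with
    | some _ => some (PySem.Str.strip (String.ofList (s.take i)),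
                      PySem.Str.strip (String.ofList (s.drop i)))
    | none => pvScan s (i + 1)
  else none
termination_by s.length - i

def pvStepB (result : PySem.Dict String String) (raw : String) : PySem.Dict String String :=
  let entry := PySem.Str.strip raw
  if PySem.Str.len entry = 0 then result
  else
    match pvScan entry.toList 0 with
    | none => result.insert entry ""
    | some (name, version_spec) => result.insert name version_spec

def normalize_requirements_py_alt (entries : List String) : List (String × String) :=
  (entries.foldl pvStepB (PySem.Dict.mk [])).items

-- ===== PRECONDITION & SPEC =====
def Spec_normalize_requirements_py (entries : List String) (out : List (String × String)) : Prop := out = normalize_requirements_py_alt entries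
instance (entries : List String) (out : List (String × String)) : Decidable (Spec_normalize_requirements_py entries out) := by unfold Spec_normalize_requirements_py; infer_instance

-- ===== CLAIM (what is proved, stated in full; the proofs are below) =====
def Claim_equal_normalize_requirements_py : Prop := ∀ (entries : List String), Dom_normalize_requirements_py entries → Spec_normalize_requirements_py entries (normalize_requirements_py entries)

-- ===== LEMMAS AND PROOFS =====

-- some operator starts at index j of cs
def pvHit (cs : List Char) (j : Nat) : Bool :=
  pvOps.any (fun op => PySem.Chars.startswith (cs.drop j) op.toList)

theorem pvOps_ne_nil : ∀ op ∈ pvOps, op.toList ≠ [] := by decide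

theorem pvHit_of_prefix {cs : List Char} {k : Nat} {op : String} (hop : op ∈ pvOps)
    (hpre : op.toList <+: cs.drop k) : pvHit cs k = true := by
  unfold pvHit
  rw [List.any_eq_true]
  exact ⟨op, hop, (PySem.Chars.startswith_iff _ _).2 hpre⟩

theorem pvHit_lt_len {cs : List Char} {j : Nat} (h : pvHit cs j = true) : j < cs.length := by
  unfold pvHit at h
  rw [List.any_eq_true] at h
  obtain ⟨op, hop, hsw⟩ := h
  have hpre := (PySem.Chars.startswith_iff _ _).1 hsw
  by_contra hge
  have hnil : cs.drop j = [] := List.drop_eq_nil_of_le (by omega)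
  rw [hnil, List.prefix_nil] at hpre
  exact pvOps_ne_nil op hop hpre

theorem pvScan_none {cs : List Char} (h : ∀ j, pvHit cs j = false) (i : Nat) :
    pvScan cs i = none := by
  unfold pvScan
  split
  · have hn : pvOps.find? (fun op => PySem.Chars.startswith (cs.drop i) op.toList) = none := by
      rw [List.find?_eq_none]
      intro op hop hsw
      have := pvHit_of_prefix hop ((PySem.Chars.startswith_iff _ _).1 hsw)
      rw [h i] at this; exact Bool.false_ne_true this
    rw [hn]
    exact pvScan_none h (i + 1)
  · rfl
termination_by cs.length - i

theorem pvScan_least {cs : List Char} {j₀ : Nat} (hj : pvHit cs j₀ = true)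
    (hmin : ∀ k < j₀, pvHit cs k = false) :
    ∀ i ≤ j₀, pvScan cs i = some (PySem.Str.strip (String.ofList (cs.take j₀)),
                                  PySem.Str.strip (String.ofList (cs.drop j₀))) := by
  intro i hi
  have hlen : j₀ < cs.length := pvHit_lt_len hj
  unfold pvScan
  rw [dif_pos (by omega)]
  rcases Nat.eq_or_lt_of_le hi with heq | hlt
  · subst heq
    unfold pvHit at hj
    rw [List.any_eq_true] at hj
    obtain ⟨op, hop, hsw⟩ := hj
    cases hfind : pvOps.find? (fun op => PySem.Chars.startswith (cs.drop i) op.toList) with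
    | none =>
      rw [List.find?_eq_none] at hfind
      exact absurd hsw (hfind op hop)
    | some o => rfl
  · have hn : pvOps.find? (fun op => PySem.Chars.startswith (cs.drop i) op.toList) = none := by
      rw [List.find?_eq_none]
      intro op hop hsw
      have := pvHit_of_prefix hop ((PySem.Chars.startswith_iff _ _).1 hsw)
      rw [hmin i hlt] at this; exact Bool.false_ne_true this
    rw [hn]
    exact pvScan_least hj hmin (i + 1) (by omega)
termination_by i => j₀ - i

theorem pvMin?_go {α : Type} (key : α → Int) (t : List α) (m : α) :
    ∃ r, List.foldl
        (fun acc x => match acc with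
          | none => some x
          | some m => if key x < key m then some x else some m)
        (some m) t = some r ∧ key r ≤ key m ∧ ∀ y ∈ t, key r ≤ key y := by
  induction t generalizing m with
  | nil => exact ⟨m, rfl, le_refl _, by simp⟩
  | cons x t ih =>
    rw [List.foldl_cons]
    by_cases h : key x < key m
    · obtain ⟨r, hr, hrx, hall⟩ := ih x
      refine ⟨r, by simpa [h] using hr, le_of_lt (lt_of_le_of_lt hrx h), ?_⟩
      intro y hy
      rcases List.mem_cons.1 hy with rfl | hy
      · exact hrx
      · exact hall y hy
    · obtain ⟨r, hr, hrm, hall⟩ := ih m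
      refine ⟨r, by simpa [h] using hr, hrm, ?_⟩
      intro y hy
      rcases List.mem_cons.1 hy with rfl | hy
      · exact le_trans hrm (le_of_not_gt h)
      · exact hall y hy

-- candidates of A as a filter-map
theorem pvCand_eq (spec : String) (ops : List String) (acc : List (Int × String)) :
    ops.foldl (pvCandStep spec) acc =
      acc ++ (ops.filter (fun op => PySem.Str.len op ≠ 0 ∧ PySem.Str.find spec op ≠ -1)).map
        (fun op => (PySem.Str.find spec op, op)) := by
  induction ops generalizing acc with
  | nil => simp
  | cons op t ih =>
    rw [List.foldl_cons, ih, List.filter_cons]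
    unfold pvCandStep
    by_cases h1 : op = "" <;> by_cases h2 : PySem.Chars.find spec.toList op.toList = -1 <;>
      simp [h1, h2]

theorem pvMinD_key_le {α : Type} (xs : List α) (key : α → Int) (d y : α) (hy : y ∈ xs) :
    key (PySem.List.minD xs key d) ≤ key y := by
  cases xs with
  | nil => cases hy
  | cons x t =>
    obtain ⟨r, hr, hrx, hall⟩ := pvMin?_go key t x
    have hmin? : PySem.List.min? (x :: t) key = some r := by
      unfold PySem.List.min?
      rw [List.foldl_cons]
      exact hr
    unfold PySem.List.minD
    rw [hmin?]
    rcases List.mem_cons.1 hy with h | h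
    · subst h; exact hrx
    · exact hall y h

theorem pvFind_eq_least {spec : String} {j₀ : Nat} {op : String} (hop : op ∈ pvOps)
    (hmin : ∀ k < j₀, pvHit spec.toList k = false)
    (hpre : op.toList <+: spec.toList.drop j₀) :
    PySem.Str.find spec op = (j₀ : Int) := by
  rw [PySem.Str.find_eq]
  have hinf : op.toList <:+: spec.toList :=
    (PySem.Chars.isIn_iff_infix _ _).1 ((PySem.Chars.exists_prefix_drop_iff_isIn _ _).1 ⟨j₀, hpre⟩)
  have h0 : 0 ≤ PySem.Chars.find spec.toList op.toList := (PySem.Chars.find_nonneg_iff _ _).2 hinf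
  obtain ⟨hp, hm⟩ := PySem.Chars.find_spec h0
  rcases lt_trichotomy (PySem.Chars.find spec.toList op.toList).toNat j₀ with hlt | heq | hgt
  · exfalso
    have := pvHit_of_prefix hop hp
    rw [hmin _ hlt] at this; exact Bool.false_ne_true this
  · omega
  · exact absurd hpre (hm j₀ hgt)

theorem pvFind_gt {spec : String} {j₀ : Nat} {op : String} (hop : op ∈ pvOps)
    (hmin : ∀ k < j₀, pvHit spec.toList k = false)
    (hnpre : ¬ op.toList <+: spec.toList.drop j₀)
    (hne : PySem.Str.find spec op ≠ -1) :
    (j₀ : Int) < PySem.Str.find spec op := by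
  rw [PySem.Str.find_eq] at *
  have hge := PySem.Chars.neg_one_le_find spec.toList op.toList
  have h0 : 0 ≤ PySem.Chars.find spec.toList op.toList := by omega
  obtain ⟨hp, hm⟩ := PySem.Chars.find_spec h0
  rcases lt_trichotomy (PySem.Chars.find spec.toList op.toList).toNat j₀ with hlt | heq | hgt
  · exfalso
    have := pvHit_of_prefix hop hp
    rw [hmin _ hlt] at this; exact Bool.false_ne_true this
  · exact absurd (heq ▸ hp) hnpre
  · omega

theorem pvOps_len : ∀ op ∈ pvOps, PySem.Str.len op ≠ 0 := by decide

theorem pvScan_nil : pvScan [] 0 = none := by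
  unfold pvScan
  simp

theorem pvDetect_eq (entry : String) (hs : PySem.Str.strip entry = entry) :
    pvDetect entry = pvScan entry.toList 0 := by
  unfold pvDetect
  simp only [hs]
  by_cases hlen : PySem.Str.len entry = 0
  · rw [if_pos hlen]
    have hnil : entry.toList = [] := by
      have h := PySem.Str.len_eq entry
      rw [hlen] at h
      have : entry.toList.length = 0 := by omega
      exact List.length_eq_zero_iff.1 this
    rw [hnil, pvScan_nil]
  · rw [if_neg hlen]
    have hsorted : PySem.List.sorted ["!=", "==", ">=", "<=", ">", "<", "~=", "==="]
        (fun o => PySem.Str.len o) true = pvOps := by decide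
    rw [hsorted, pvCand_eq, List.nil_append]
    by_cases hex : ∃ j, pvHit entry.toList j = true
    · have hj : pvHit entry.toList (Nat.find hex) = true := Nat.find_spec hex
      have hmin : ∀ k < Nat.find hex, pvHit entry.toList k = false := by
        intro k hk
        have := Nat.find_min hex hk
        simpa using this
      rw [pvScan_least hj hmin 0 (Nat.zero_le _)]
      have hj' := hj
      unfold pvHit at hj'
      rw [List.any_eq_true] at hj'
      obtain ⟨op₀, hop₀, hsw₀⟩ := hj'
      have hpre₀ := (PySem.Chars.startswith_iff _ _).1 hsw₀
      have hfind₀ : PySem.Str.find entry op₀ = (Nat.find hex : Int) :=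
        pvFind_eq_least hop₀ hmin hpre₀
      have hop₀f : op₀ ∈ List.filter
          (fun op => decide (PySem.Str.len op ≠ 0 ∧ PySem.Str.find entry op ≠ -1)) pvOps := by
        rw [List.mem_filter]
        refine ⟨hop₀, ?_⟩
        have h1 := pvOps_len op₀ hop₀
        have h2 : PySem.Str.find entry op₀ ≠ -1 := by rw [hfind₀]; omega
        simp only [decide_eq_true_eq, ne_eq]
        exact ⟨by simpa using h1, by simpa [PySem.Str.find_eq] using h2⟩
      cases hcl : List.map (fun op => (PySem.Str.find entry op, op))
          (List.filter (fun op => decide (PySem.Str.len op ≠ 0 ∧ PySem.Str.find entry op ≠ -1))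
            pvOps) with
      | nil =>
        exfalso
        rw [List.map_eq_nil_iff] at hcl
        rw [hcl] at hop₀f
        cases hop₀f
      | cons c rest =>
        have hmem : PySem.List.minD (c :: rest) (fun t => t.1) c ∈
            List.map (fun op => (PySem.Str.find entry op, op))
              (List.filter
                (fun op => decide (PySem.Str.len op ≠ 0 ∧ PySem.Str.find entry op ≠ -1)) pvOps) := by
          rw [hcl]
          exact PySem.List.minD_mem (c :: rest) (fun t => t.1) c (by simp)
        obtain ⟨opb, hopbf, hopb_eq⟩ := List.mem_map.1 hmem
        have hopb := (List.mem_filter.1 hopbf).1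
        have hopbc := (List.mem_filter.1 hopbf).2
        have hfindb_ne : PySem.Str.find entry opb ≠ -1 := by
          simp only [decide_eq_true_eq] at hopbc
          exact hopbc.2
        have hge : (Nat.find hex : Int) ≤ (PySem.List.minD (c :: rest) (fun t => t.1) c).1 := by
          rw [← hopb_eq]
          by_cases hp : opb.toList <+: entry.toList.drop (Nat.find hex)
          · rw [show ((PySem.Str.find entry opb, opb).1) = PySem.Str.find entry opb from rfl,
              pvFind_eq_least hopb hmin hp]
          · exact le_of_lt (pvFind_gt hopb hmin hp hfindb_ne)
        have hle : (PySem.List.minD (c :: rest) (fun t => t.1) c).1 ≤ (Nat.find hex : Int) := by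
          have hy : ((Nat.find hex : Int), op₀) ∈ c :: rest := by
            rw [← hcl]
            exact List.mem_map.2 ⟨op₀, hop₀f, by rw [hfind₀]⟩
          have := pvMinD_key_le (c :: rest) (fun t => t.1) c _ hy
          simpa using this
        have hbest : (PySem.List.minD (c :: rest) (fun t => t.1) c).1 = (Nat.find hex : Int) :=
          le_antisymm hle hge
        have hsl1 : PySem.Str.slice entry none (some (Nat.find hex : Int)) =
            String.ofList (entry.toList.take (Nat.find hex)) := by
          calc PySem.Str.slice entry none (some (Nat.find hex : Int))
              = String.ofList (PySem.Str.slice entry none (some (Nat.find hex : Int))).toList :=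
                (String.ofList_toList).symm
            _ = String.ofList (entry.toList.take (Nat.find hex)) := by
                rw [PySem.Str.toList_slice, PySem.Chars.slice_eq_listSlice,
                  PySem.List.slice_to entry.toList (by omega)]
                simp
        have hsl2 : PySem.Str.slice entry (some (Nat.find hex : Int)) none =
            String.ofList (entry.toList.drop (Nat.find hex)) := by
          calc PySem.Str.slice entry (some (Nat.find hex : Int)) none
              = String.ofList (PySem.Str.slice entry (some (Nat.find hex : Int)) none).toList :=
                (String.ofList_toList).symm
            _ = String.ofList (entry.toList.drop (Nat.find hex)) := by
                rw [PySem.Str.toList_slice, PySem.Chars.slice_eq_listSlice,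
                  PySem.List.slice_from entry.toList (by omega)]
                simp
        simp only [hbest, hsl1, hsl2]
    · have hall : ∀ j, pvHit entry.toList j = false := by
        intro j
        by_contra h
        exact hex ⟨j, by simpa using h⟩
      rw [pvScan_none hall 0]
      have hfilter : List.filter
          (fun op => decide (PySem.Str.len op ≠ 0 ∧ PySem.Str.find entry op ≠ -1)) pvOps = [] := by
        rw [List.filter_eq_nil_iff]
        intro op hop
        simp only [decide_eq_true_eq, not_and, ne_eq, not_not]
        intro _
        rw [PySem.Str.find_eq, PySem.Chars.find_eq_neg_one_iff]
        intro hinf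
        have hex' : ∃ j, op.toList <+: entry.toList.drop j := by
          rw [PySem.Chars.exists_prefix_drop_iff_isIn, PySem.Chars.isIn_iff_infix]
          exact hinf
        obtain ⟨j, hpre⟩ := hex'
        have := pvHit_of_prefix hop hpre
        rw [hall j] at this
        exact Bool.false_ne_true this
      rw [hfilter]
      rfl

theorem pvDropWhile_prefix {p : Char → Bool} {u t : List Char} (hu : u <+: t)
    (ht : List.dropWhile p t = t) : List.dropWhile p u = u := by
  cases u with
  | nil => rfl
  | cons c u' =>
    obtain ⟨r, hr⟩ := hu
    have hc : p c = false := by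
      by_contra hpc
      have hpc' : p c = true := by revert hpc; cases p c <;> simp
      rw [← hr, List.cons_append, List.dropWhile_cons, hpc'] at ht
      have := congrArg List.length ht
      have hle := List.length_dropWhile_le p (u' ++ r)
      simp [List.length_append] at this hle
      omega
    rw [List.dropWhile_cons, hc]
    simp

theorem pvChars_strip_idem (l : List Char) :
    PySem.Chars.strip (PySem.Chars.strip l) = PySem.Chars.strip l := by
  unfold PySem.Chars.strip PySem.Chars.rstrip PySem.Chars.lstrip
  set p := PySem.Chars.isspace
  set t := List.dropWhile p l with ht
  have hidem : List.dropWhile p t = t := List.dropWhile_idempotent p l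
  have hpre : (List.dropWhile p t.reverse).reverse <+: t := by
    have hsuf : List.dropWhile p t.reverse <:+ t.reverse := List.dropWhile_suffix p
    obtain ⟨r, hr⟩ := hsuf
    exact ⟨r.reverse, by rw [← List.reverse_append, hr, List.reverse_reverse]⟩
  rw [pvDropWhile_prefix hpre hidem, List.reverse_reverse, List.dropWhile_idempotent]

theorem pvStrip_idem (s : String) : PySem.Str.strip (PySem.Str.strip s) = PySem.Str.strip s := by
  have h : (PySem.Str.strip (PySem.Str.strip s)).toList = (PySem.Str.strip s).toList := by
    rw [PySem.Str.toList_strip, PySem.Str.toList_strip]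
    exact pvChars_strip_idem s.toList
  calc PySem.Str.strip (PySem.Str.strip s)
      = String.ofList (PySem.Str.strip (PySem.Str.strip s)).toList := (String.ofList_toList).symm
    _ = String.ofList (PySem.Str.strip s).toList := by rw [h]
    _ = PySem.Str.strip s := String.ofList_toList

-- ===== VERDICT (by name: the statement is the Claim_ definition above) =====
theorem normalize_requirements_py_spec : Claim_equal_normalize_requirements_py := by
  intro entries _
  unfold Spec_normalize_requirements_py normalize_requirements_py normalize_requirements_py_alt
  refine congrArg PySem.Dict.items ?_
  have hstep : pvStepA = pvStepB := by
    funext result raw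
    unfold pvStepA pvStepB
    simp only [pvDetect_eq (PySem.Str.strip raw) (pvStrip_idem raw)]
  rw [hstep]
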